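-- pv_equiv track=rewrite | github.com/CatDarkGame/reels-catcher-extension | generate-icons.py | build_icon
-- ===== SOURCE A (Python) =====
-- BACKGROUND = (239, 107, 63, 255)
--
-- FOREGROUND = (255, 244, 233, 255)
--
-- SHADOW = (198, 72, 31, 255)
--
-- def build_icon(size: int) -> list[tuple[int, int, int, int]]:
--     pixels = [BACKGROUND] * (size * size)
--
--     border = max(1, size // 16)
--     inset = max(2, size // 8)
--     stem = max(2, size // 7)
--     top = inset
--     bottom = size - inset
--     left = inset
--     mid = size // 2
--
--     for y in range(size):
--         for x in range(size):
--             if x < border or y < border or x >= size - border or y >= size - border: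
--                 pixels[y * size + x] = SHADOW
--
--     def draw_rect(x0: int, y0: int, x1: int, y1: int, color: tuple[int, int, int, int]) -> None:
--         for y in range(max(0, y0), min(size, y1)):
--             for x in range(max(0, x0), min(size, x1)):
--                 pixels[y * size + x] = color
--
--     def draw_circle(cx: int, cy: int, radius: int, color: tuple[int, int, int, int]) -> None:
--         rr = radius * radius
--         for y in range(max(0, cy - radius), min(size, cy + radius + 1)):
--             for x in range(max(0, cx - radius), min(size, cx + radius + 1)):
--                 dx = x - cx
--                 dy = y - cy
--                 if dx * dx + dy * dy <= rr:
--                     pixels[y * size + x] = color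
--
--     draw_rect(left, top, left + stem, bottom, FOREGROUND)
--     draw_rect(left, top, mid + stem // 2, top + stem, FOREGROUND)
--     draw_circle(mid + inset // 2, size - inset - stem, stem + max(1, size // 18), FOREGROUND)
--     draw_circle(mid + inset // 2, size - inset - stem, max(1, stem // 2), BACKGROUND)
--
--     return pixels
-- ===== SOURCE B (Python) =====
-- BACKGROUND = (239, 107, 63, 255)
--
-- FOREGROUND = (255, 244, 233, 255)
--
-- SHADOW = (198, 72, 31, 255)
--
-- def build_icon(size: int) -> list[tuple[int, int, int, int]]:
--     border = max(1, size // 16)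
--     inset = max(2, size // 8)
--     stem = max(2, size // 7)
--     top = inset
--     bottom = size - inset
--     left = inset
--     mid = size // 2
--     cx = mid + inset // 2
--     cy = size - inset - stem
--     r_in = max(1, stem // 2)
--     r_out = stem + max(1, size // 18)
--     rin2 = r_in * r_in
--     rout2 = r_out * r_out
--     bar_x1 = mid + stem // 2
--     bar_y1 = top + stem
--     stem_x1 = left + stem
--     bx = size - border
--
--     # single pass: decide each pixel's final color by shape priority
--     # (inner circle, outer circle, bar, stem, border, background)
--     pixels = [BACKGROUND] * (size * size)
--     for y in range(size):
--         dy = y - cy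
--         dy2 = dy * dy
--         row = y * size
--         for x in range(size):
--             dx = x - cx
--             d2 = dx * dx + dy2
--             if d2 <= rin2:
--                 c = BACKGROUND
--             elif d2 <= rout2:
--                 c = FOREGROUND
--             elif left <= x < bar_x1 and top <= y < bar_y1:
--                 c = FOREGROUND
--             elif left <= x < stem_x1 and top <= y < bottom:
--                 c = FOREGROUND
--             elif x < border or y < border or x >= bx or y >= bx:
--                 c = SHADOW
--             else:
--                 c = BACKGROUND
--             pixels[row + x] = c
--     return pixels
-- ===== Notes on version B (the rewrite author's own statement) =====
-- stated objective: alternative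
-- what changed: B replaces A's five sequential in-place painting passes (full-grid boundary scan, two rect painters, two circle painters overwriting each other) with a single pass over the grid that computes each pixel's final color directly by a priority-ordered decision chain (inner circle, outer circle, bar, stem, border, background).
import Mathlib
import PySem

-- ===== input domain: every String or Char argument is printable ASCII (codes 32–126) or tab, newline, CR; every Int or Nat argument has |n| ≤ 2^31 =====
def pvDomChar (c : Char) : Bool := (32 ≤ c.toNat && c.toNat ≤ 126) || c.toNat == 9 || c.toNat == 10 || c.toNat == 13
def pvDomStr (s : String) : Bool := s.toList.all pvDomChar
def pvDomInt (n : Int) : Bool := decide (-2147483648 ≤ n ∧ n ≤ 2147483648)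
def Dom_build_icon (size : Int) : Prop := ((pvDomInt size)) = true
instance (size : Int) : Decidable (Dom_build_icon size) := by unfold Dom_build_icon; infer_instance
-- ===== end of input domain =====

-- B replaces A's five sequential in-place painting passes by a single pass that computes each
-- pixel's final color with a priority-ordered per-pixel predicate; same return value, no speed claim.

def pvBACKGROUND : Int × Int × Int × Int := (239, 107, 63, 255)
def pvFOREGROUND : Int × Int × Int × Int := (255, 244, 233, 255)
def pvSHADOW : Int × Int × Int × Int := (198, 72, 31, 255)

-- ===== PORT A =====
-- Python writes pixels[y*size+x]; inside every loop 0 ≤ y*size+x < size*size, so .toNat is exact.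
def pvDrawRect (size x0 y0 x1 y1 : Int) (color : Int × Int × Int × Int)
    (p : List (Int × Int × Int × Int)) : List (Int × Int × Int × Int) :=
  (PySem.List.pyRange (max 0 y0) (min size y1) 1).foldl (fun p y =>
    (PySem.List.pyRange (max 0 x0) (min size x1) 1).foldl (fun p x =>
      p.set (y * size + x).toNat color) p) p

def pvDrawCircle (size cx cy radius : Int) (color : Int × Int × Int × Int)
    (p : List (Int × Int × Int × Int)) : List (Int × Int × Int × Int) :=
  let rr := radius * radius
  (PySem.List.pyRange (max 0 (cy - radius)) (min size (cy + radius + 1)) 1).foldl (fun p y =>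
    (PySem.List.pyRange (max 0 (cx - radius)) (min size (cx + radius + 1)) 1).foldl (fun p x =>
      if (x - cx) * (x - cx) + (y - cy) * (y - cy) ≤ rr
      then p.set (y * size + x).toNat color else p) p) p

def build_icon (size : Int) : List (Int × Int × Int × Int) :=
  let pixels0 := List.replicate (size * size).toNat pvBACKGROUND
  let border := max 1 (PySem.Int.floordiv size 16)
  let inset := max 2 (PySem.Int.floordiv size 8)
  let stem := max 2 (PySem.Int.floordiv size 7)
  let top := inset
  let bottom := size - inset
  let left := inset
  let mid := PySem.Int.floordiv size 2
  let pixels1 := (PySem.List.pyRange 0 size 1).foldl (fun p y =>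
    (PySem.List.pyRange 0 size 1).foldl (fun p x =>
      if x < border ∨ y < border ∨ size - border ≤ x ∨ size - border ≤ y
      then p.set (y * size + x).toNat pvSHADOW else p) p) pixels0
  let pixels2 := pvDrawRect size left top (left + stem) bottom pvFOREGROUND pixels1
  let pixels3 := pvDrawRect size left top (mid + PySem.Int.floordiv stem 2) (top + stem) pvFOREGROUND pixels2
  let pixels4 := pvDrawCircle size (mid + PySem.Int.floordiv inset 2) (size - inset - stem)
      (stem + max 1 (PySem.Int.floordiv size 18)) pvFOREGROUND pixels3
  pvDrawCircle size (mid + PySem.Int.floordiv inset 2) (size - inset - stem)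
      (max 1 (PySem.Int.floordiv stem 2)) pvBACKGROUND pixels4

-- ===== PORT B =====
def build_icon_alt (size : Int) : List (Int × Int × Int × Int) :=
  let border := max 1 (PySem.Int.floordiv size 16)
  let inset := max 2 (PySem.Int.floordiv size 8)
  let stem := max 2 (PySem.Int.floordiv size 7)
  let top := inset
  let bottom := size - inset
  let left := inset
  let mid := PySem.Int.floordiv size 2
  let cx := mid + PySem.Int.floordiv inset 2
  let cy := size - inset - stem
  let rIn := max 1 (PySem.Int.floordiv stem 2)
  let rOut := stem + max 1 (PySem.Int.floordiv size 18)
  let rin2 := rIn * rIn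
  let rout2 := rOut * rOut
  let barX1 := mid + PySem.Int.floordiv stem 2
  let barY1 := top + stem
  let stemX1 := left + stem
  let bx := size - border
  -- single pass: per-pixel priority decision (inner circle, outer circle, bar, stem, border, bg)
  let pixels0 := List.replicate (size * size).toNat pvBACKGROUND
  (PySem.List.pyRange 0 size 1).foldl (fun p y =>
    let dy := y - cy
    let dy2 := dy * dy
    let row := y * size
    (PySem.List.pyRange 0 size 1).foldl (fun p x =>
      let dx := x - cx
      let d2 := dx * dx + dy2
      let c :=
        if d2 ≤ rin2 then pvBACKGROUND
        else if d2 ≤ rout2 then pvFOREGROUND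
        else if left ≤ x ∧ x < barX1 ∧ top ≤ y ∧ y < barY1 then pvFOREGROUND
        else if left ≤ x ∧ x < stemX1 ∧ top ≤ y ∧ y < bottom then pvFOREGROUND
        else if x < border ∨ y < border ∨ bx ≤ x ∨ bx ≤ y then pvSHADOW
        else pvBACKGROUND
      p.set (row + x).toNat c) p) pixels0

-- ===== PRECONDITION & SPEC =====
def Spec_build_icon (size : Int) (out : List (Int × Int × Int × Int)) : Prop := out = build_icon_alt size
instance (size : Int) (out : List (Int × Int × Int × Int)) : Decidable (Spec_build_icon size out) := by unfold Spec_build_icon; infer_instance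

-- ===== CLAIM (what is proved, stated in full; the proofs are below) =====
def Claim_equal_build_icon : Prop := ∀ (size : Int), Dom_build_icon size → Spec_build_icon size (build_icon size)

-- ===== LEMMAS AND PROOFS =====

-- proof-side index-list views of A's painting stages
def pvFill (idxs : List Int) (color : Int × Int × Int × Int)
    (p : List (Int × Int × Int × Int)) : List (Int × Int × Int × Int) :=
  idxs.foldl (fun p i => p.set i.toNat color) p

def pvRectIdxs (size x0 y0 x1 y1 : Int) : List Int :=
  (PySem.List.pyRange (max 0 y0) (min size y1) 1).flatMap (fun y =>
    (PySem.List.pyRange (max 0 x0) (min size x1) 1).map (fun x => y * size + x))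

def pvCircleIdxs (size cx cy radius : Int) : List Int :=
  let rr := radius * radius
  (PySem.List.pyRange (max 0 (cy - radius)) (min size (cy + radius + 1)) 1).flatMap (fun y =>
    (PySem.List.pyRange (max 0 (cx - radius)) (min size (cx + radius + 1)) 1).flatMap (fun x =>
      if (x - cx) * (x - cx) + (y - cy) * (y - cy) ≤ rr then [y * size + x] else []))

theorem pv_nested_eq_fill {α β : Type} (ys : List α) (g : α → List β) (ix : α → β → Int)
    (c : Int × Int × Int × Int) (p : List (Int × Int × Int × Int)) :
    ys.foldl (fun p y => (g y).foldl (fun p x => p.set (ix y x).toNat c) p) p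
      = pvFill (ys.flatMap (fun y => (g y).map (ix y))) c p := by
  induction ys generalizing p with
  | nil => rfl
  | cons y t ih =>
      simp only [List.foldl_cons, List.flatMap_cons, pvFill, List.foldl_append, List.foldl_map]
      exact ih _

theorem pv_cond_inner_eq_fill {β : Type} (xs : List β) (cnd : β → Prop) [DecidablePred cnd]
    (ix : β → Int) (c : Int × Int × Int × Int) (p : List (Int × Int × Int × Int)) :
    xs.foldl (fun p x => if cnd x then p.set (ix x).toNat c else p) p
      = pvFill (xs.flatMap (fun x => if cnd x then [ix x] else [])) c p := by
  induction xs generalizing p with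
  | nil => rfl
  | cons x t ih =>
      simp only [List.foldl_cons, List.flatMap_cons, pvFill, List.foldl_append]
      by_cases h : cnd x <;> simp [h, pvFill] at ih ⊢ <;> exact ih _

theorem pv_cond_nested_eq_fill {α β : Type} (ys : List α) (g : α → List β)
    (cnd : α → β → Prop) [∀ y x, Decidable (cnd y x)] (ix : α → β → Int)
    (c : Int × Int × Int × Int) (p : List (Int × Int × Int × Int)) :
    ys.foldl (fun p y => (g y).foldl (fun p x => if cnd y x then p.set (ix y x).toNat c else p) p) p
      = pvFill (ys.flatMap (fun y => (g y).flatMap (fun x => if cnd y x then [ix y x] else []))) c p := by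
  induction ys generalizing p with
  | nil => rfl
  | cons y t ih =>
      simp only [List.foldl_cons, List.flatMap_cons, pvFill, List.foldl_append]
      rw [pv_cond_inner_eq_fill (g y) (cnd y) (ix y) c p]
      exact ih _

theorem pvDrawRect_eq (size x0 y0 x1 y1 : Int) (c : Int × Int × Int × Int)
    (p : List (Int × Int × Int × Int)) :
    pvDrawRect size x0 y0 x1 y1 c p = pvFill (pvRectIdxs size x0 y0 x1 y1) c p := by
  unfold pvDrawRect pvRectIdxs
  exact pv_nested_eq_fill _ _ _ _ _

theorem pvDrawCircle_eq (size cx cy radius : Int) (c : Int × Int × Int × Int)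
    (p : List (Int × Int × Int × Int)) :
    pvDrawCircle size cx cy radius c p = pvFill (pvCircleIdxs size cx cy radius) c p := by
  unfold pvDrawCircle pvCircleIdxs
  exact pv_cond_nested_eq_fill _ _ _ _ _ _

theorem pvFill_getElem? (idxs : List Int) (c : Int × Int × Int × Int)
    (p : List (Int × Int × Int × Int)) (j : Nat) :
    (pvFill idxs c p)[j]? = if j ∈ idxs.map Int.toNat ∧ j < p.length then some c else p[j]? := by
  induction idxs generalizing p with
  | nil => simp [pvFill]
  | cons i t ih =>
      simp only [pvFill, List.foldl_cons] at ih ⊢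
      rw [ih]
      simp only [List.length_set, List.map_cons, List.mem_cons]
      by_cases ht : j ∈ t.map Int.toNat
      · by_cases hl : j < p.length <;> simp [ht, hl]
      · by_cases hi : j = i.toNat
        · subst hi
          by_cases hl : i.toNat < p.length <;>
            simp [ht, hl]
        · simp [ht, hi, Ne.symm hi]

theorem pvFill_length (idxs : List Int) (c : Int × Int × Int × Int)
    (p : List (Int × Int × Int × Int)) : (pvFill idxs c p).length = p.length := by
  induction idxs generalizing p with
  | nil => rfl
  | cons i t ih => simp only [pvFill, List.foldl_cons] at ih ⊢; rw [ih]; simp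

-- B-side: the grid fold as a single write list
theorem pv_write_flatten {α β γ : Type} (ys : List α) (g : α → List β) (ix : α → β → Nat)
    (f : α → β → γ) (p : List γ) :
    ys.foldl (fun p y => (g y).foldl (fun p x => p.set (ix y x) (f y x)) p) p
      = (ys.flatMap (fun y => (g y).map (fun x => (ix y x, f y x)))).foldl
          (fun p a => p.set a.1 a.2) p := by
  induction ys generalizing p with
  | nil => rfl
  | cons y t ih =>
      simp only [List.foldl_cons, List.flatMap_cons, List.foldl_append, List.foldl_map]
      exact ih _

theorem pv_write_getElem? {γ : Type} (L : List (Nat × γ)) (g0 : Nat → γ) (p : List γ) (j : Nat)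
    (hg : ∀ a ∈ L, a.2 = g0 a.1) :
    (L.foldl (fun p a => p.set a.1 a.2) p)[j]? =
      if j ∈ L.map Prod.fst ∧ j < p.length then some (g0 j) else p[j]? := by
  induction L generalizing p with
  | nil => simp
  | cons a t ih =>
      simp only [List.foldl_cons, List.map_cons, List.mem_cons]
      rw [ih _ (fun b hb => hg b (List.mem_cons_of_mem _ hb))]
      simp only [List.length_set]
      by_cases ht : j ∈ t.map Prod.fst
      · by_cases hl : j < p.length <;> simp [ht, hl]
      · by_cases hi : j = a.1
        · subst hi
          have hv : a.2 = g0 a.1 := hg a (List.mem_cons_self)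
          by_cases hl : a.1 < p.length <;> simp [ht, hl, List.getElem?_set, hv]
        · simp [ht, hi, Ne.symm hi, List.getElem?_set]

-- proof-side: the per-pixel decision of B's inner loop, abstracted over the precomputed locals
def pvColorAt (size border inset stem top bottom left mid : Int) (x y : Int) : Int × Int × Int × Int :=
  let cx := mid + PySem.Int.floordiv inset 2
  let cy := size - inset - stem
  let rIn := max 1 (PySem.Int.floordiv stem 2)
  let rOut := stem + max 1 (PySem.Int.floordiv size 18)
  let dx := x - cx
  let dy := y - cy
  let d2 := dx * dx + dy * dy
  if d2 ≤ rIn * rIn then pvBACKGROUND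
  else if d2 ≤ rOut * rOut then pvFOREGROUND
  else if left ≤ x ∧ x < mid + PySem.Int.floordiv stem 2 ∧ top ≤ y ∧ y < top + stem then pvFOREGROUND
  else if left ≤ x ∧ x < left + stem ∧ top ≤ y ∧ y < bottom then pvFOREGROUND
  else if x < border ∨ y < border ∨ size - border ≤ x ∨ size - border ≤ y then pvSHADOW
  else pvBACKGROUND

-- decoding j = y*size+x with 0 ≤ x < size
theorem pv_decode (size y x : Int) (hs : 0 < size) (hx0 : 0 ≤ x) (hxs : x < size) :
    (y * size + x) / size = y ∧ (y * size + x) % size = x := by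
  have h1 : y * size + x = x + y * size := by ring
  constructor
  · rw [h1, Int.add_mul_ediv_right _ _ (ne_of_gt hs), Int.ediv_eq_zero_of_lt hx0 hxs, zero_add]
  · rw [h1, Int.add_mul_emod_self_right, Int.emod_eq_of_lt hx0 hxs]

theorem pv_encode (size : Int) (hs : 0 < size) (j : Nat) :
    ((j : Int) / size) * size + (j : Int) % size = (j : Int) := by
  rw [mul_comm]; exact Int.ediv_add_emod _ _

theorem pv_sq_bounds (a r : Int) (hr : 0 ≤ r) (h : a * a ≤ r * r) : -r ≤ a ∧ a ≤ r := by
  constructor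
  · by_contra hc
    push_neg at hc
    have h2 : r < -a := by omega
    have := mul_self_lt_mul_self hr h2
    nlinarith
  · by_contra hc
    push_neg at hc
    have := mul_self_lt_mul_self hr hc
    nlinarith

-- membership characterizations at pixel j (X = j % size, Y = j / size)
theorem pv_mem_rect (size x0 y0 x1 y1 : Int) (j : Nat) (hs : 0 < size)
    (hj : (j : Int) < size * size) (hx0 : 0 ≤ x0) (hy0 : 0 ≤ y0) :
    (j ∈ (pvRectIdxs size x0 y0 x1 y1).map Int.toNat) ↔
      (x0 ≤ (j : Int) % size ∧ (j : Int) % size < x1 ∧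
       y0 ≤ (j : Int) / size ∧ (j : Int) / size < y1) := by
  have hX0 : 0 ≤ (j : Int) % size := Int.emod_nonneg _ (ne_of_gt hs)
  have hXs : (j : Int) % size < size := Int.emod_lt_of_pos _ hs
  have hY0 : 0 ≤ (j : Int) / size := Int.ediv_nonneg (Int.natCast_nonneg j) (le_of_lt hs)
  have hYs : (j : Int) / size < size := by
    rw [Int.ediv_lt_iff_lt_mul hs]; linarith
  simp only [pvRectIdxs, List.map_flatMap, List.map_map, List.mem_flatMap, List.mem_map,
    Function.comp, PySem.List.mem_pyRange_one]
  constructor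
  · rintro ⟨y, ⟨hy1, hy2⟩, x, ⟨hx1, hx2⟩, hmj⟩
    have hxl : 0 ≤ x := le_trans (le_max_left 0 x0) hx1
    have hxr : x < size := lt_of_lt_of_le hx2 (min_le_left _ _)
    have hyl : 0 ≤ y := le_trans (le_max_left 0 y0) hy1
    have hnn : 0 ≤ y * size + x := add_nonneg (mul_nonneg hyl (le_of_lt hs)) hxl
    have hje : (y * size + x) = (j : Int) := by omega
    obtain ⟨hd, hm⟩ := pv_decode size y x hs hxl hxr
    rw [hje] at hd hm
    rw [hm, hd]
    refine ⟨le_trans (le_max_right 0 x0) hx1, lt_of_lt_of_le hx2 (min_le_right _ _),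
      le_trans (le_max_right 0 y0) hy1, lt_of_lt_of_le hy2 (min_le_right _ _)⟩
  · rintro ⟨h1, h2, h3, h4⟩
    refine ⟨(j : Int) / size, ⟨max_le hY0 h3, lt_min hYs h4⟩,
      (j : Int) % size, ⟨max_le hX0 h1, lt_min hXs h2⟩, ?_⟩
    rw [pv_encode size hs j]
    exact Int.toNat_natCast j

theorem pv_mem_circle (size cx cy r : Int) (j : Nat) (hs : 0 < size)
    (hj : (j : Int) < size * size) (hr : 0 ≤ r) :
    (j ∈ (pvCircleIdxs size cx cy r).map Int.toNat) ↔
      ((j : Int) % size - cx) * ((j : Int) % size - cx) +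
        ((j : Int) / size - cy) * ((j : Int) / size - cy) ≤ r * r := by
  have hX0 : 0 ≤ (j : Int) % size := Int.emod_nonneg _ (ne_of_gt hs)
  have hXs : (j : Int) % size < size := Int.emod_lt_of_pos _ hs
  have hY0 : 0 ≤ (j : Int) / size := Int.ediv_nonneg (Int.natCast_nonneg j) (le_of_lt hs)
  have hYs : (j : Int) / size < size := by
    rw [Int.ediv_lt_iff_lt_mul hs]; linarith
  simp only [pvCircleIdxs, List.mem_map, List.mem_flatMap, PySem.List.mem_pyRange_one]
  constructor
  · rintro ⟨i, ⟨y, ⟨hy1, hy2⟩, x, ⟨hx1, hx2⟩, hif⟩, hij⟩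
    by_cases hc : (x - cx) * (x - cx) + (y - cy) * (y - cy) ≤ r * r
    · rw [if_pos hc] at hif
      simp only [List.mem_singleton] at hif
      subst hif
      have hxl : 0 ≤ x := le_trans (le_max_left 0 _) hx1
      have hxr : x < size := lt_of_lt_of_le hx2 (min_le_left _ _)
      have hyl : 0 ≤ y := le_trans (le_max_left 0 _) hy1
      have hnn : 0 ≤ y * size + x := add_nonneg (mul_nonneg hyl (le_of_lt hs)) hxl
      have hje : (j : Int) = y * size + x := by
        have h2 := Int.toNat_of_nonneg hnn
        rw [hij] at h2
        exact h2
      obtain ⟨hd, hm⟩ := pv_decode size y x hs hxl hxr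
      rw [← hje] at hd hm
      rw [hd, hm]
      exact hc
    · rw [if_neg hc] at hif; simp at hif
  · intro h
    have hdx := pv_sq_bounds ((j : Int) % size - cx) r hr
      (by nlinarith [mul_self_nonneg ((j : Int) / size - cy)])
    have hdy := pv_sq_bounds ((j : Int) / size - cy) r hr
      (by nlinarith [mul_self_nonneg ((j : Int) % size - cx)])
    refine ⟨(j : Int) / size * size + (j : Int) % size,
      ⟨(j : Int) / size, ⟨max_le hY0 (by omega), lt_min hYs (by omega)⟩,
       (j : Int) % size, ⟨max_le hX0 (by omega), lt_min hXs (by omega)⟩, ?_⟩, ?_⟩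
    · rw [if_pos h]
      exact List.mem_singleton.mpr rfl
    · rw [pv_encode size hs j]
      exact Int.toNat_natCast j

theorem pv_mem_border (size border : Int) (j : Nat) (hs : 0 < size)
    (hj : (j : Int) < size * size) :
    (j ∈ (PySem.List.pyRange 0 size 1).flatMap (fun y =>
        (PySem.List.pyRange 0 size 1).flatMap (fun x =>
          List.map Int.toNat
            (if x < border ∨ y < border ∨ size - border ≤ x ∨ size - border ≤ y
             then [y * size + x] else [])))) ↔
      ((j : Int) % size < border ∨ (j : Int) / size < border ∨
       size - border ≤ (j : Int) % size ∨ size - border ≤ (j : Int) / size) := by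
  have hX0 : 0 ≤ (j : Int) % size := Int.emod_nonneg _ (ne_of_gt hs)
  have hXs : (j : Int) % size < size := Int.emod_lt_of_pos _ hs
  have hY0 : 0 ≤ (j : Int) / size := Int.ediv_nonneg (Int.natCast_nonneg j) (le_of_lt hs)
  have hYs : (j : Int) / size < size := by
    rw [Int.ediv_lt_iff_lt_mul hs]; linarith
  simp only [List.mem_flatMap, List.mem_map, PySem.List.mem_pyRange_one]
  constructor
  · rintro ⟨y, ⟨hy1, hy2⟩, x, ⟨hx1, hx2⟩, i, hif, hij⟩
    by_cases hc : x < border ∨ y < border ∨ size - border ≤ x ∨ size - border ≤ y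
    · rw [if_pos hc] at hif
      simp only [List.mem_singleton] at hif
      subst hif
      have hnn : 0 ≤ y * size + x := add_nonneg (mul_nonneg hy1 (le_of_lt hs)) hx1
      have hje : (j : Int) = y * size + x := by
        have h2 := Int.toNat_of_nonneg hnn
        rw [hij] at h2
        exact h2
      obtain ⟨hd, hm⟩ := pv_decode size y x hs hx1 hx2
      rw [← hje] at hd hm
      rw [hd, hm]
      exact hc
    · rw [if_neg hc] at hif; simp at hif
  · intro h
    refine ⟨(j : Int) / size, ⟨hY0, hYs⟩, (j : Int) % size, ⟨hX0, hXs⟩,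
      (j : Int) / size * size + (j : Int) % size, ?_, ?_⟩
    · rw [if_pos h]
      exact List.mem_singleton.mpr rfl
    · rw [pv_encode size hs j]
      exact Int.toNat_natCast j

theorem pv_mem_grid (size : Int) (j : Nat) (hs : 0 < size) :
    (j ∈ (PySem.List.pyRange 0 size 1).flatMap (fun y =>
        (PySem.List.pyRange 0 size 1).map (fun x => (y * size + x).toNat))) ↔
      (j : Int) < size * size := by
  have hX0 : 0 ≤ (j : Int) % size := Int.emod_nonneg _ (ne_of_gt hs)
  have hXs : (j : Int) % size < size := Int.emod_lt_of_pos _ hs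
  have hY0 : 0 ≤ (j : Int) / size := Int.ediv_nonneg (Int.natCast_nonneg j) (le_of_lt hs)
  simp only [List.mem_flatMap, List.mem_map, PySem.List.mem_pyRange_one]
  constructor
  · rintro ⟨y, ⟨hy1, hy2⟩, x, ⟨hx1, hx2⟩, hij⟩
    have h1 : y * size ≤ (size - 1) * size :=
      mul_le_mul_of_nonneg_right (by omega) (le_of_lt hs)
    have h2 : (size - 1) * size + size = size * size := by ring
    have hnn : 0 ≤ y * size + x := add_nonneg (mul_nonneg hy1 (le_of_lt hs)) hx1
    have hje : (j : Int) = y * size + x := by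
      have h3 := Int.toNat_of_nonneg hnn
      rw [hij] at h3
      exact h3
    linarith
  · intro h
    refine ⟨(j : Int) / size, ⟨hY0, by rw [Int.ediv_lt_iff_lt_mul hs]; linarith⟩,
      (j : Int) % size, ⟨hX0, hXs⟩, ?_⟩
    rw [pv_encode size hs j]
    exact Int.toNat_natCast j

theorem pv_core (size border inset stem top bottom left mid : Int) (hs : 0 < size)
    (hleft : 0 ≤ left) (htop : 0 ≤ top) (hstem : 0 ≤ stem) :
    (pvDrawCircle size (mid + PySem.Int.floordiv inset 2) (size - inset - stem)
        (max 1 (PySem.Int.floordiv stem 2)) pvBACKGROUND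
      (pvDrawCircle size (mid + PySem.Int.floordiv inset 2) (size - inset - stem)
        (stem + max 1 (PySem.Int.floordiv size 18)) pvFOREGROUND
      (pvDrawRect size left top (mid + PySem.Int.floordiv stem 2) (top + stem) pvFOREGROUND
      (pvDrawRect size left top (left + stem) bottom pvFOREGROUND
      ((PySem.List.pyRange 0 size 1).foldl (fun p y =>
        (PySem.List.pyRange 0 size 1).foldl (fun p x =>
          if x < border ∨ y < border ∨ size - border ≤ x ∨ size - border ≤ y
          then p.set (y * size + x).toNat pvSHADOW else p) p)
        (List.replicate (size * size).toNat pvBACKGROUND))))))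
    = (PySem.List.pyRange 0 size 1).foldl (fun p y =>
        (PySem.List.pyRange 0 size 1).foldl (fun p x =>
          p.set (y * size + x).toNat (pvColorAt size border inset stem top bottom left mid x y)) p)
        (List.replicate (size * size).toNat pvBACKGROUND) := by
  have hrIn : (0 : Int) ≤ max 1 (PySem.Int.floordiv stem 2) :=
    le_trans (by norm_num) (le_max_left 1 _)
  have hrOut : (0 : Int) ≤ stem + max 1 (PySem.Int.floordiv size 18) :=
    add_nonneg hstem (le_trans (by norm_num) (le_max_left 1 _))
  rw [pvDrawCircle_eq, pvDrawCircle_eq, pvDrawRect_eq, pvDrawRect_eq, pv_cond_nested_eq_fill,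
    pv_write_flatten (PySem.List.pyRange 0 size 1) (fun _ => PySem.List.pyRange 0 size 1)
      (fun y x => (y * size + x).toNat)
      (fun y x => pvColorAt size border inset stem top bottom left mid x y)]
  apply List.ext_getElem?
  intro j
  rw [pv_write_getElem? _
    (fun j => pvColorAt size border inset stem top bottom left mid ((j : Int) % size)
      ((j : Int) / size)) _ j ?hg]
  case hg =>
    rintro a ha
    simp only [List.mem_flatMap, List.mem_map, PySem.List.mem_pyRange_one] at ha
    obtain ⟨y, ⟨hy1, hy2⟩, x, ⟨hx1, hx2⟩, rfl⟩ := ha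
    have hnn : 0 ≤ y * size + x := add_nonneg (mul_nonneg hy1 (le_of_lt hs)) hx1
    obtain ⟨hd, hm⟩ := pv_decode size y x hs hx1 hx2
    simp only [Int.toNat_of_nonneg hnn, hd, hm]
  simp only [pvFill_getElem?, pvFill_length, List.length_replicate, List.map_flatMap,
    List.map_map, Function.comp_def]
  by_cases hj : j < (size * size).toNat
  · have h0 : (0 : Int) ≤ size * size := mul_nonneg (le_of_lt hs) (le_of_lt hs)
    have hjI : (j : Int) < size * size := by omega
    simp only [pv_mem_circle size _ _ _ j hs hjI hrIn, pv_mem_circle size _ _ _ j hs hjI hrOut,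
      pv_mem_rect size left top _ _ j hs hjI hleft htop,
      pv_mem_border size border j hs hjI]
    have hg : j ∈ (PySem.List.pyRange 0 size 1).flatMap (fun y =>
        (PySem.List.pyRange 0 size 1).map fun x => (y * size + x).toNat) :=
      (pv_mem_grid size j hs).mpr hjI
    simp only [hj, hg, and_true, if_true, true_and, List.getElem?_replicate, if_pos hj,
      pvColorAt]
    split_ifs <;> rfl
  · have hg : ¬ j ∈ (PySem.List.pyRange 0 size 1).flatMap (fun y =>
        (PySem.List.pyRange 0 size 1).map fun x => (y * size + x).toNat) := by
      intro hmem
      have h0 : (0 : Int) ≤ size * size := mul_nonneg (le_of_lt hs) (le_of_lt hs)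
      have := (pv_mem_grid size j hs).mp hmem
      omega
    simp [hj, hg]

theorem pv_trivial (size : Int) (hs : size ≤ 0) : build_icon size = build_icon_alt size := by
  have hr : PySem.List.pyRange 0 size 1 = [] := PySem.List.pyRange_one_eq_nil hs
  simp only [build_icon, build_icon_alt, pvDrawRect, pvDrawCircle, hr, List.foldl_nil]
  rw [PySem.List.pyRange_one_eq_nil (by omega),
    PySem.List.pyRange_one_eq_nil (by omega),
    PySem.List.pyRange_one_eq_nil (by omega),
    PySem.List.pyRange_one_eq_nil (by omega)]
  simp

-- ===== VERDICT (by name: the statement is the Claim_ definition above) =====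
theorem build_icon_spec : Claim_equal_build_icon := by
  intro size _
  simp only [Spec_build_icon]
  by_cases hs : 0 < size
  · simp only [build_icon, build_icon_alt]
    exact pv_core size _ _ _ _ _ _ _ hs
      (le_trans (by norm_num) (le_max_left 2 _))
      (le_trans (by norm_num) (le_max_left 2 _))
      (le_trans (by norm_num) (le_max_left 2 _))
  · exact pv_trivial size (by omega)
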